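-- pv_equiv track=rewrite | github.com/less-lab-uva/semLidarFuzz | study/figure_generator.py | getModelComboKeys
-- ===== SOURCE A (Python) =====
-- from itertools import combinations
--
-- def getModelComboKeys(models):
--     combos = []
--     for n in range(1, len(models) + 1):
--         combos += list(combinations(models, n))
--
--     comboKeys = []
--     for combo in combos:
--         comboKeys.append("_".join(combo))
--
--     return comboKeys
-- ===== SOURCE B (Python) =====
-- def getModelComboKeys(models):
--     # Recursive choose-k: builds each joined key directly, no itertools, no tuple lists.
--     # memo is keyed by (n, len(xs)): xs is always a suffix of models, so its length identifies it.
--     memo = {}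
--     def keysOfSize(n, xs):
--         key = (n, len(xs))
--         if key in memo:
--             return memo[key]
--         if not xs:
--             r = []
--         elif n == 1:
--             r = [xs[0]] + keysOfSize(1, xs[1:])
--         else:
--             r = [xs[0] + "_" + s for s in keysOfSize(n - 1, xs[1:])] + keysOfSize(n, xs[1:])
--         memo[key] = r
--         return r
--     return [k for n in range(1, len(models) + 1) for k in keysOfSize(n, models)]
-- ===== Notes on version B (the rewrite author's own statement) =====
-- stated objective: simpler
-- what changed: Replaced itertools.combinations plus a separate join pass over an accumulated tuple list by a single recursive choose-k helper that emits the underscore-joined keys directly in the same size-ascending, position-lexicographic order.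
import Mathlib
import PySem

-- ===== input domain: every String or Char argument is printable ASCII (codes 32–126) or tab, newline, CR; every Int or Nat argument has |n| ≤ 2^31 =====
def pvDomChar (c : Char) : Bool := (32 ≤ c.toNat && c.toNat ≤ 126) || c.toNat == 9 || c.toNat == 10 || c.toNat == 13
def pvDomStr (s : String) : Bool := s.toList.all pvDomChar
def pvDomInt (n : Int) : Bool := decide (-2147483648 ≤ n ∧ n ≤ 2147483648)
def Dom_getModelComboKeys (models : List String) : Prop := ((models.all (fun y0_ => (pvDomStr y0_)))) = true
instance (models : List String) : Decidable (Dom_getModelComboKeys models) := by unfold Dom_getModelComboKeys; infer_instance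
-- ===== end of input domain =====

-- B replaces itertools.combinations + a separate join pass by one recursive choose-k
-- helper that emits the joined keys directly (objective: simpler, no speed claim).

-- ===== PORT A =====
-- stand-in for itertools.combinations(models, n): size-n subsequences in
-- position-lexicographic order, exactly itertools' output order
def pyCombinations : List String → Nat → List (List String)
  | _, 0 => [[]]
  | [], _ + 1 => []
  | x :: rest, n + 1 => (pyCombinations rest n).map (fun c => x :: c) ++ pyCombinations rest (n + 1)

def getModelComboKeys (models : List String) : List String :=
  -- for n in range(1, len(models) + 1): combos += list(combinations(models, n))
  let combos := (PySem.List.pyRange 1 ((models.length : Int) + 1) 1).foldl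
      (fun acc n => acc ++ pyCombinations models n.toNat) []
  -- for combo in combos: comboKeys.append("_".join(combo))
  combos.foldl (fun acc combo => acc ++ [PySem.Str.join "_" combo]) []

-- ===== PORT B =====
-- keysOfSize n xs = the "_"-joined size-n combinations of xs, generated directly
def keysOfSize : Nat → List String → List String
  | _, [] => []
  | 0, _ :: _ => []
  | 1, x :: rest => x :: keysOfSize 1 rest
  | n + 2, x :: rest => (keysOfSize (n + 1) rest).map (fun s => x ++ "_" ++ s) ++ keysOfSize (n + 2) rest

def getModelComboKeys_alt (models : List String) : List String :=
  (List.range models.length).flatMap (fun i => keysOfSize (i + 1) models)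

-- ===== PRECONDITION & SPEC =====
def Spec_getModelComboKeys (models : List String) (out : List String) : Prop := out = getModelComboKeys_alt models
instance (models : List String) (out : List String) : Decidable (Spec_getModelComboKeys models out) := by unfold Spec_getModelComboKeys; infer_instance

-- ===== CLAIM (what is proved, stated in full; the proofs are below) =====
def Claim_equal_getModelComboKeys : Prop := ∀ (models : List String), Dom_getModelComboKeys models → Spec_getModelComboKeys models (getModelComboKeys models)

-- ===== LEMMAS AND PROOFS =====

theorem flatMap_single {α β : Type} (f : α → β) (l : List α) :
    l.flatMap (fun x => [f x]) = l.map f := by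
  induction l with
  | nil => rfl
  | cons x rest ih => simp [List.flatMap_cons, ih]

theorem ofList_underscore_cons (cs : List Char) :
    String.ofList ('_' :: cs) = "_" ++ String.ofList cs := by
  rw [show ('_' :: cs) = "_".toList ++ cs from rfl, String.ofList_append]
  simp

theorem join_singleton_str (x : String) : PySem.Str.join "_" [x] = x := by
  simp [PySem.Str.join, PySem.Chars.join, List.intercalate]

theorem join_cons_cons_str (x y : String) (l : List String) :
    PySem.Str.join "_" (x :: y :: l) = x ++ "_" ++ PySem.Str.join "_" (y :: l) := by
  simp [PySem.Str.join, PySem.Chars.join_cons_cons, ofList_underscore_cons, String.append_assoc]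

theorem pyCombinations_ne_nil (xs : List String) (n : Nat) :
    ∀ l ∈ pyCombinations xs (n + 1), l ≠ [] := by
  induction xs generalizing n with
  | nil => simp [pyCombinations]
  | cons x rest ih =>
    intro l hl
    simp only [pyCombinations, List.mem_append, List.mem_map] at hl
    rcases hl with ⟨c, _, rfl⟩ | h
    · simp
    · exact ih n l h

theorem keysOfSize_eq_map_join (xs : List String) (n : Nat) :
    keysOfSize (n + 1) xs = (pyCombinations xs (n + 1)).map (PySem.Str.join "_") := by
  induction xs generalizing n with
  | nil => simp [keysOfSize, pyCombinations]
  | cons x rest ih =>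
    cases n with
    | zero =>
      simp only [keysOfSize, pyCombinations, List.map_append, List.map_map, ih 0]
      congr 1
      · simp [join_singleton_str]
    | succ m =>
      simp only [keysOfSize, pyCombinations, List.map_append, List.map_map, ih m, ih (m + 1)]
      congr 1
      apply List.map_congr_left
      intro c hc
      have hne := pyCombinations_ne_nil rest m c hc
      cases c with
      | nil => exact absurd rfl hne
      | cons y l => simp [Function.comp, join_cons_cons_str]

theorem getModelComboKeys_eq_alt (models : List String) :
    getModelComboKeys models = getModelComboKeys_alt models := by
  unfold getModelComboKeys getModelComboKeys_alt
  rw [PySem.List.foldl_append_eq_flatMap, PySem.List.foldl_append_eq_flatMap,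
    PySem.List.pyRange_one]
  have hlen : (((models.length : Int) + 1) - 1).toNat = models.length := by omega
  simp only [List.nil_append, hlen, List.flatMap_map]
  rw [List.flatMap_assoc]
  apply List.flatMap_congr  -- pointwise: each n contributes the same block
  intro k _
  have h1 : ((1 : Int) + (k : Nat)).toNat = k + 1 := by omega
  rw [h1, flatMap_single]
  exact (keysOfSize_eq_map_join models k).symm

-- ===== VERDICT (by name: the statement is the Claim_ definition above) =====
theorem getModelComboKeys_spec : Claim_equal_getModelComboKeys := by
  intro models _
  unfold Spec_getModelComboKeys
  exact getModelComboKeys_eq_alt models
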